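-- pv_equiv track=rewrite | github.com/24-KARANI/log_analysis_tool | aggregation.py | aggregate_statistics
-- ===== SOURCE A (Python) =====
-- from collections import Counter
--
-- def aggregate_statistics(entries):
--     """
--     Aggregate log entries into meaningful statistics per category.
--     Returns a dict of counters keyed by category.
--     """
--     stats = {
--         "pacman_installs": Counter(),
--         "pacman_removals": Counter(),
--         "sudo_usage": Counter(),
--         "system_errors": Counter(),
--         "audit_login_attempts": Counter(),
--         "audit_auth_events": Counter(),
--         "audit_access_violations": Counter(),
--         "user_logins": Counter()
--     }
--
--     for e in entries:
--         cat = e.get("category")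
--
--         # --- Pacman installs ---
--         if cat == "package_install":
--             msg = e.get("message", "")
--             parts = msg.split()
--             pkg = parts[-2] if len(parts) > 1 else "unknown"
--             stats["pacman_installs"][pkg] += 1
--
--         # --- Pacman removals ---
--         elif cat == "package_removals":
--             msg = e.get("message", "")
--             parts = msg.split()
--             pkg = parts[-2] if len(parts) > 1 else "unknown"
--             stats["pacman_removals"][pkg] += 1
--
--         # --- Journalctl sudo usage ---
--         elif cat == "sudo_usage":
--             # Try to extract user from message like "user karani executed command ..."
--             msg = e.get("message", "")
--             user = "unknown"
--             for token in msg.split():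
--                 if token.lower() == "user":
--                     idx = msg.split().index(token)
--                     if idx + 1 < len(msg.split()):
--                         user = msg.split()[idx+1]
--                         break
--             stats["sudo_usage"][user] += 1
--
--         # --- Journalctl system errors ---
--         elif cat == "system_error":
--             proc = e.get("process", "unknown")
--             stats["system_errors"][proc] += 1
--
--         # --- Audit login attempts ---
--         elif cat == "login_attempt":
--             user = e.get("AUID") or e.get("auid") or e.get("UID") or e.get("uid") or "unknown"
--             stats["audit_login_attempts"][user] += 1
--
--         # --- Audit authentication events ---
--         elif cat == "auth_event":
--             user = e.get("UID") or e.get("uid") or "unknown"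
--             stats["audit_auth_events"][user] += 1
--
--         # --- Audit access violations ---
--         elif cat == "access_violation":
--             exe = e.get("exe") or "unknown"
--             stats["audit_access_violations"][exe] += 1
--
--         # --- Login sessions ---
--         elif cat == "user_login":
--             user = e.get("username") or e.get("user") or "unknown"
--             stats["user_logins"][user] += 1
--
--     return stats
-- ===== SOURCE B (Python) =====
-- from collections import Counter
--
--
-- def _pkg(e):
--     parts = e.get("message", "").split()
--     return parts[-2] if len(parts) > 1 else "unknown"
--
--
-- def _sudo_user(e):
--     tokens = e.get("message", "").split()
--     for tok in tokens:
--         if tok.lower() == "user":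
--             j = tokens.index(tok)
--             if j + 1 < len(tokens):
--                 return tokens[j + 1]
--     return "unknown"
--
--
-- def _first_truthy(e, keys):
--     for k in keys:
--         v = e.get(k)
--         if v:
--             return v
--     return "unknown"
--
--
-- _SPEC = [
--     ("pacman_installs", "package_install", _pkg),
--     ("pacman_removals", "package_removals", _pkg),
--     ("sudo_usage", "sudo_usage", _sudo_user),
--     ("system_errors", "system_error", lambda e: e.get("process", "unknown")),
--     ("audit_login_attempts", "login_attempt",
--      lambda e: _first_truthy(e, ("AUID", "auid", "UID", "uid"))),
--     ("audit_auth_events", "auth_event",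
--      lambda e: _first_truthy(e, ("UID", "uid"))),
--     ("audit_access_violations", "access_violation",
--      lambda e: _first_truthy(e, ("exe",))),
--     ("user_logins", "user_login",
--      lambda e: _first_truthy(e, ("username", "user"))),
-- ]
--
--
-- def aggregate_statistics(entries):
--     # Phase 1: bucket the entries by category value.
--     buckets = {}
--     for e in entries:
--         buckets.setdefault(e.get("category"), []).append(e)
--     # Phase 2: one Counter per known category, from its bucket.
--     return {name: Counter(extract(e) for e in buckets.get(cat, []))
--             for name, cat, extract in _SPEC}
-- ===== Notes on version B (the rewrite author's own statement) =====
-- stated objective: alternative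
-- what changed: A classifies each entry inside one loop with an 8-way elif chain that increments nested Counters in place; B first buckets entries by their category value in one pass and then builds each of the eight Counters in a second phase by applying that category's extraction rule to its bucket.
import Mathlib
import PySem

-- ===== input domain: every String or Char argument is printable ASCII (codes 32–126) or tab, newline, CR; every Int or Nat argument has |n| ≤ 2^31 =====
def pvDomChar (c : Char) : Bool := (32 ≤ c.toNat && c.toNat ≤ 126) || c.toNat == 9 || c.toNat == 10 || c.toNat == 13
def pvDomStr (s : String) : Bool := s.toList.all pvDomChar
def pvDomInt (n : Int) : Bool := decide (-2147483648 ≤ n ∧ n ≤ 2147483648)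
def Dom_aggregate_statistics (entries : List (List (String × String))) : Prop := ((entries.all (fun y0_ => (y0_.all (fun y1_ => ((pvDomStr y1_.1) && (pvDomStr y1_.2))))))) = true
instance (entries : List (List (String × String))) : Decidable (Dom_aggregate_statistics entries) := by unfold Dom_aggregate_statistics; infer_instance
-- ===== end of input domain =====

-- B re-decomposes A's single 8-branch loop into two phases (bucket by category, then one
-- Counter per category from its bucket); same return value, objective: alternative decomposition.

-- ===== PORT A =====
-- Python `x or y` on an optional string (None and "" are falsy)
def pyOrS (o : Option String) (y : String) : String :=
  match o with
  | some s => if s == "" then y else s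
  | none => y

-- the sudo `for token in msg.split(): …` loop; both Pythons contain this identical loop,
-- so both ports share this helper (`all` = the full token list, the second argument = the rest to scan)
def pvSudoScan (all : List String) : List String → String
  | [] => "unknown"
  | t :: rs =>
    if PySem.Str.lower t == "user" then
      match PySem.List.index? all t with
      | some idx => if idx + 1 < all.length then all.getD (idx + 1) "" else pvSudoScan all rs
      | none => pvSudoScan all rs   -- unreachable: t is a member of `all`
    else pvSudoScan all rs

-- the body of A's `for e in entries:` loop
def aggStep (stats : PySem.Dict String (PySem.Dict String Int)) (e : List (String × String)) :
    PySem.Dict String (PySem.Dict String Int) :=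
  let cat := (PySem.Dict.mk e).get? "category"
  if cat == some "package_install" then
    let msg := ((PySem.Dict.mk e).get? "message").getD ""
    let parts := PySem.Str.split₀ msg
    let pkg := if 1 < parts.length then PySem.List.pyGetD parts (-2) "" else "unknown"
    stats.modify "pacman_installs" PySem.Dict.empty (fun c => c.modify pkg 0 (· + 1))
  else if cat == some "package_removals" then
    let msg := ((PySem.Dict.mk e).get? "message").getD ""
    let parts := PySem.Str.split₀ msg
    let pkg := if 1 < parts.length then PySem.List.pyGetD parts (-2) "" else "unknown"
    stats.modify "pacman_removals" PySem.Dict.empty (fun c => c.modify pkg 0 (· + 1))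
  else if cat == some "sudo_usage" then
    let msg := ((PySem.Dict.mk e).get? "message").getD ""
    let user := pvSudoScan (PySem.Str.split₀ msg) (PySem.Str.split₀ msg)
    stats.modify "sudo_usage" PySem.Dict.empty (fun c => c.modify user 0 (· + 1))
  else if cat == some "system_error" then
    let proc := ((PySem.Dict.mk e).get? "process").getD "unknown"
    stats.modify "system_errors" PySem.Dict.empty (fun c => c.modify proc 0 (· + 1))
  else if cat == some "login_attempt" then
    let user := pyOrS ((PySem.Dict.mk e).get? "AUID") (pyOrS ((PySem.Dict.mk e).get? "auid")
      (pyOrS ((PySem.Dict.mk e).get? "UID") (pyOrS ((PySem.Dict.mk e).get? "uid") "unknown")))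
    stats.modify "audit_login_attempts" PySem.Dict.empty (fun c => c.modify user 0 (· + 1))
  else if cat == some "auth_event" then
    let user := pyOrS ((PySem.Dict.mk e).get? "UID") (pyOrS ((PySem.Dict.mk e).get? "uid") "unknown")
    stats.modify "audit_auth_events" PySem.Dict.empty (fun c => c.modify user 0 (· + 1))
  else if cat == some "access_violation" then
    let exe := pyOrS ((PySem.Dict.mk e).get? "exe") "unknown"
    stats.modify "audit_access_violations" PySem.Dict.empty (fun c => c.modify exe 0 (· + 1))
  else if cat == some "user_login" then
    let user := pyOrS ((PySem.Dict.mk e).get? "username") (pyOrS ((PySem.Dict.mk e).get? "user") "unknown")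
    stats.modify "user_logins" PySem.Dict.empty (fun c => c.modify user 0 (· + 1))
  else stats

def aggregate_statistics (entries : List (List (String × String))) : List (String × List (String × Int)) :=
  let stats0 : PySem.Dict String (PySem.Dict String Int) := PySem.Dict.mk
    [("pacman_installs", PySem.Dict.empty), ("pacman_removals", PySem.Dict.empty),
     ("sudo_usage", PySem.Dict.empty), ("system_errors", PySem.Dict.empty),
     ("audit_login_attempts", PySem.Dict.empty), ("audit_auth_events", PySem.Dict.empty),
     ("audit_access_violations", PySem.Dict.empty), ("user_logins", PySem.Dict.empty)]
  let stats := entries.foldl aggStep stats0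
  stats.items.map (fun p => (p.1, p.2.items))

-- ===== PORT B =====
def bPkg (e : List (String × String)) : String :=
  let parts := PySem.Str.split₀ (((PySem.Dict.mk e).get? "message").getD "")
  if 1 < parts.length then PySem.List.pyGetD parts (-2) "" else "unknown"

def bSudoUser (e : List (String × String)) : String :=
  let tokens := PySem.Str.split₀ (((PySem.Dict.mk e).get? "message").getD "")
  pvSudoScan tokens tokens

def bFirstTruthy (e : List (String × String)) : List String → String
  | [] => "unknown"
  | k :: ks =>
    match (PySem.Dict.mk e).get? k with
    | some v => if v == "" then bFirstTruthy e ks else v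
    | none => bFirstTruthy e ks

def bSpec : List (String × String × (List (String × String) → String)) :=
  [("pacman_installs", "package_install", bPkg),
   ("pacman_removals", "package_removals", bPkg),
   ("sudo_usage", "sudo_usage", bSudoUser),
   ("system_errors", "system_error", fun e => ((PySem.Dict.mk e).get? "process").getD "unknown"),
   ("audit_login_attempts", "login_attempt", fun e => bFirstTruthy e ["AUID", "auid", "UID", "uid"]),
   ("audit_auth_events", "auth_event", fun e => bFirstTruthy e ["UID", "uid"]),
   ("audit_access_violations", "access_violation", fun e => bFirstTruthy e ["exe"]),
   ("user_logins", "user_login", fun e => bFirstTruthy e ["username", "user"])]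

-- phase 1: buckets.setdefault(e.get("category"), []).append(e)
def bBuckets (entries : List (List (String × String))) :
    PySem.Dict (Option String) (List (List (String × String))) :=
  entries.foldl (fun b e => b.modify ((PySem.Dict.mk e).get? "category") [] (· ++ [e])) PySem.Dict.empty

def aggregate_statistics_alt (entries : List (List (String × String))) : List (String × List (String × Int)) :=
  let buckets := bBuckets entries
  bSpec.map (fun s => (s.1, (PySem.Dict.counter ((buckets.getD (some s.2.1) []).map s.2.2)).items))

-- ===== PRECONDITION & SPEC =====
def Spec_aggregate_statistics (entries : List (List (String × String))) (out : List (String × List (String × Int))) : Prop := out = aggregate_statistics_alt entries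
instance (entries : List (List (String × String))) (out : List (String × List (String × Int))) : Decidable (Spec_aggregate_statistics entries out) := by unfold Spec_aggregate_statistics; infer_instance

-- ===== CLAIM (what is proved, stated in full; the proofs are below) =====
def Claim_equal_aggregate_statistics : Prop := ∀ (entries : List (List (String × String))), Dom_aggregate_statistics entries → Spec_aggregate_statistics entries (aggregate_statistics entries)

-- ===== LEMMAS AND PROOFS =====

-- the list of keys category `cat` counts over, extracted by `f`
def keysFor (f : List (String × String) → String) (cat : String)
    (l : List (List (String × String))) : List String :=
  (l.filter (fun e => (PySem.Dict.mk e).get? "category" == some cat)).map f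

def cntFrom (c : PySem.Dict String Int) (ks : List String) : PySem.Dict String Int :=
  ks.foldl (fun c x => c.modify x 0 (· + 1)) c

theorem bBuckets_getD (entries : List (List (String × String))) (c : Option String) :
    (bBuckets entries).getD c []
      = entries.filter (fun e => (PySem.Dict.mk e).get? "category" == c) := by
  have h : bBuckets entries
      = (entries.map (fun e => ((PySem.Dict.mk e).get? "category", e))).foldl
          (fun d p => d.modify p.1 [] (· ++ [p.2])) PySem.Dict.empty := by
    rw [List.foldl_map]; rfl
  rw [h, PySem.Dict.getD_foldl_modify_append]
  simp [List.filter_map, Function.comp_def]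

theorem modStats1 (c1 c2 c3 c4 c5 c6 c7 c8 : PySem.Dict String Int)
    (f : PySem.Dict String Int → PySem.Dict String Int) :
    (PySem.Dict.mk
      [("pacman_installs", c1), ("pacman_removals", c2), ("sudo_usage", c3), ("system_errors", c4), ("audit_login_attempts", c5), ("audit_auth_events", c6), ("audit_access_violations", c7), ("user_logins", c8)]).modify "pacman_installs" PySem.Dict.empty f = PySem.Dict.mk
      [("pacman_installs", (f c1)), ("pacman_removals", c2), ("sudo_usage", c3), ("system_errors", c4), ("audit_login_attempts", c5), ("audit_auth_events", c6), ("audit_access_violations", c7), ("user_logins", c8)] := rfl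

theorem modStats2 (c1 c2 c3 c4 c5 c6 c7 c8 : PySem.Dict String Int)
    (f : PySem.Dict String Int → PySem.Dict String Int) :
    (PySem.Dict.mk
      [("pacman_installs", c1), ("pacman_removals", c2), ("sudo_usage", c3), ("system_errors", c4), ("audit_login_attempts", c5), ("audit_auth_events", c6), ("audit_access_violations", c7), ("user_logins", c8)]).modify "pacman_removals" PySem.Dict.empty f = PySem.Dict.mk
      [("pacman_installs", c1), ("pacman_removals", (f c2)), ("sudo_usage", c3), ("system_errors", c4), ("audit_login_attempts", c5), ("audit_auth_events", c6), ("audit_access_violations", c7), ("user_logins", c8)] := rfl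

theorem modStats3 (c1 c2 c3 c4 c5 c6 c7 c8 : PySem.Dict String Int)
    (f : PySem.Dict String Int → PySem.Dict String Int) :
    (PySem.Dict.mk
      [("pacman_installs", c1), ("pacman_removals", c2), ("sudo_usage", c3), ("system_errors", c4), ("audit_login_attempts", c5), ("audit_auth_events", c6), ("audit_access_violations", c7), ("user_logins", c8)]).modify "sudo_usage" PySem.Dict.empty f = PySem.Dict.mk
      [("pacman_installs", c1), ("pacman_removals", c2), ("sudo_usage", (f c3)), ("system_errors", c4), ("audit_login_attempts", c5), ("audit_auth_events", c6), ("audit_access_violations", c7), ("user_logins", c8)] := rfl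

theorem modStats4 (c1 c2 c3 c4 c5 c6 c7 c8 : PySem.Dict String Int)
    (f : PySem.Dict String Int → PySem.Dict String Int) :
    (PySem.Dict.mk
      [("pacman_installs", c1), ("pacman_removals", c2), ("sudo_usage", c3), ("system_errors", c4), ("audit_login_attempts", c5), ("audit_auth_events", c6), ("audit_access_violations", c7), ("user_logins", c8)]).modify "system_errors" PySem.Dict.empty f = PySem.Dict.mk
      [("pacman_installs", c1), ("pacman_removals", c2), ("sudo_usage", c3), ("system_errors", (f c4)), ("audit_login_attempts", c5), ("audit_auth_events", c6), ("audit_access_violations", c7), ("user_logins", c8)] := rfl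

theorem modStats5 (c1 c2 c3 c4 c5 c6 c7 c8 : PySem.Dict String Int)
    (f : PySem.Dict String Int → PySem.Dict String Int) :
    (PySem.Dict.mk
      [("pacman_installs", c1), ("pacman_removals", c2), ("sudo_usage", c3), ("system_errors", c4), ("audit_login_attempts", c5), ("audit_auth_events", c6), ("audit_access_violations", c7), ("user_logins", c8)]).modify "audit_login_attempts" PySem.Dict.empty f = PySem.Dict.mk
      [("pacman_installs", c1), ("pacman_removals", c2), ("sudo_usage", c3), ("system_errors", c4), ("audit_login_attempts", (f c5)), ("audit_auth_events", c6), ("audit_access_violations", c7), ("user_logins", c8)] := rfl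

theorem modStats6 (c1 c2 c3 c4 c5 c6 c7 c8 : PySem.Dict String Int)
    (f : PySem.Dict String Int → PySem.Dict String Int) :
    (PySem.Dict.mk
      [("pacman_installs", c1), ("pacman_removals", c2), ("sudo_usage", c3), ("system_errors", c4), ("audit_login_attempts", c5), ("audit_auth_events", c6), ("audit_access_violations", c7), ("user_logins", c8)]).modify "audit_auth_events" PySem.Dict.empty f = PySem.Dict.mk
      [("pacman_installs", c1), ("pacman_removals", c2), ("sudo_usage", c3), ("system_errors", c4), ("audit_login_attempts", c5), ("audit_auth_events", (f c6)), ("audit_access_violations", c7), ("user_logins", c8)] := rfl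

theorem modStats7 (c1 c2 c3 c4 c5 c6 c7 c8 : PySem.Dict String Int)
    (f : PySem.Dict String Int → PySem.Dict String Int) :
    (PySem.Dict.mk
      [("pacman_installs", c1), ("pacman_removals", c2), ("sudo_usage", c3), ("system_errors", c4), ("audit_login_attempts", c5), ("audit_auth_events", c6), ("audit_access_violations", c7), ("user_logins", c8)]).modify "audit_access_violations" PySem.Dict.empty f = PySem.Dict.mk
      [("pacman_installs", c1), ("pacman_removals", c2), ("sudo_usage", c3), ("system_errors", c4), ("audit_login_attempts", c5), ("audit_auth_events", c6), ("audit_access_violations", (f c7)), ("user_logins", c8)] := rfl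

theorem modStats8 (c1 c2 c3 c4 c5 c6 c7 c8 : PySem.Dict String Int)
    (f : PySem.Dict String Int → PySem.Dict String Int) :
    (PySem.Dict.mk
      [("pacman_installs", c1), ("pacman_removals", c2), ("sudo_usage", c3), ("system_errors", c4), ("audit_login_attempts", c5), ("audit_auth_events", c6), ("audit_access_violations", c7), ("user_logins", c8)]).modify "user_logins" PySem.Dict.empty f = PySem.Dict.mk
      [("pacman_installs", c1), ("pacman_removals", c2), ("sudo_usage", c3), ("system_errors", c4), ("audit_login_attempts", c5), ("audit_auth_events", c6), ("audit_access_violations", c7), ("user_logins", (f c8))] := rfl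

theorem fold_aggStep (l : List (List (String × String)))
    (c1 c2 c3 c4 c5 c6 c7 c8 : PySem.Dict String Int) :
    l.foldl aggStep (PySem.Dict.mk
      [("pacman_installs", c1), ("pacman_removals", c2), ("sudo_usage", c3),
       ("system_errors", c4), ("audit_login_attempts", c5), ("audit_auth_events", c6),
       ("audit_access_violations", c7), ("user_logins", c8)])
    = PySem.Dict.mk
      [("pacman_installs", cntFrom c1 (keysFor bPkg "package_install" l)),
       ("pacman_removals", cntFrom c2 (keysFor bPkg "package_removals" l)),
       ("sudo_usage", cntFrom c3 (keysFor bSudoUser "sudo_usage" l)),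
       ("system_errors", cntFrom c4 (keysFor (fun e => ((PySem.Dict.mk e).get? "process").getD "unknown") "system_error" l)),
       ("audit_login_attempts", cntFrom c5 (keysFor (fun e => bFirstTruthy e ["AUID", "auid", "UID", "uid"]) "login_attempt" l)),
       ("audit_auth_events", cntFrom c6 (keysFor (fun e => bFirstTruthy e ["UID", "uid"]) "auth_event" l)),
       ("audit_access_violations", cntFrom c7 (keysFor (fun e => bFirstTruthy e ["exe"]) "access_violation" l)),
       ("user_logins", cntFrom c8 (keysFor (fun e => bFirstTruthy e ["username", "user"]) "user_login" l))] := by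
  induction l generalizing c1 c2 c3 c4 c5 c6 c7 c8 with
  | nil => simp [keysFor, cntFrom]
  | cons e l ih =>
    simp only [List.foldl_cons]
    simp only [aggStep]
    split_ifs with h1 h2 h3 h4 h5 h6 h7 h8 <;>
      simp only [beq_iff_eq] at * <;>
      simp [keysFor, *, modStats1, modStats2, modStats3, modStats4,
            modStats5, modStats6, modStats7, modStats8, cntFrom,
            bPkg, bSudoUser, pyOrS, bFirstTruthy]

-- ===== VERDICT (by name: the statement is the Claim_ definition above) =====
theorem aggregate_statistics_spec : Claim_equal_aggregate_statistics := by
  intro entries _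
  unfold Spec_aggregate_statistics
  simp only [aggregate_statistics, aggregate_statistics_alt]
  rw [fold_aggStep]
  simp [bSpec, bBuckets_getD, keysFor, cntFrom, PySem.Dict.counter_eq_foldl]
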